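-- pv_equiv track=rewrite | github.com/God-Hand/Guvi-solutions | codekata/Player/set-20/199.py | canWe
-- ===== SOURCE A (Python) =====
-- def canWe(l):
--     count=0
--     n = len(l)
--     for i in range(n//2):
--         if l[i]!=l[-i-1]:
--             count+=1
--         if count>1:
--             return "no"
--     return "yes"
-- ===== SOURCE B (Python) =====
-- def canWe(l):
--     r = l[::-1]
--     if l == r:
--         return "yes"
--     i = next(k for k in range(len(l)) if l[k] != r[k])
--     fixed = l[:i] + [r[i]] + l[i + 1:]
--     return "yes" if fixed == fixed[::-1] else "no"
-- ===== Notes on version B (the rewrite author's own statement) =====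
-- stated objective: alternative
-- what changed: Replaces the mismatch-counting half-loop by a repair strategy: if the list equals its reverse answer yes, otherwise overwrite the first mismatching position with its mirror value and answer yes exactly when the repaired list is a palindrome; no counter is maintained.
import Mathlib
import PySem

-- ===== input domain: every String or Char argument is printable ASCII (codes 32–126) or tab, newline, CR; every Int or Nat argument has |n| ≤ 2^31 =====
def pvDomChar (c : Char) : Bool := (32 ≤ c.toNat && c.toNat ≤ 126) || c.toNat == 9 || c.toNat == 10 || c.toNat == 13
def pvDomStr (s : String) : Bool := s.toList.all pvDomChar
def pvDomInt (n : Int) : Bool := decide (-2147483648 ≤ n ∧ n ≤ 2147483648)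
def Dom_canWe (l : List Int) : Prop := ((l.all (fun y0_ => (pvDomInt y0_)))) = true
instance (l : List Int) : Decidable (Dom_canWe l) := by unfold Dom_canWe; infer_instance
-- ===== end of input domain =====

-- B replaces the counting half-loop by a repair strategy: fix the first mismatch
-- against the mirror and test whether the repaired list is a palindrome; same cost.

-- ===== PORT A =====
-- loop body of A; indices drawn from range(n//2) are always in range, so pyGetD is exact here
def canWeLoop (l : List Int) (idxs : List Int) (count : Int) : String :=
  match idxs with
  | [] => "yes"
  | i :: rest =>
      let count := if PySem.List.pyGetD l i 0 ≠ PySem.List.pyGetD l (-i - 1) 0 then count + 1 else count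
      if count > 1 then "no" else canWeLoop l rest count

def canWe (l : List Int) : String :=
  let n : Int := l.length
  canWeLoop l (PySem.List.pyRange 0 (PySem.Int.floordiv n 2) 1) 0

-- ===== PORT B =====
def canWe_alt (l : List Int) : String :=
  let r := (PySem.List.slice? l none none (-1)).getD []   -- l[::-1]; step -1 ≠ 0, so slice? is some
  if l = r then "yes"
  else
    -- next(k for k in range(len(l)) if l[k] != r[k]); indices from range(len(l)) are in range, so pyGetD is exact
    match (PySem.List.pyRange 0 (l.length : Int) 1).find?
        (fun k => PySem.List.pyGetD l k 0 != PySem.List.pyGetD r k 0) with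
    | some i =>
        let fixed := PySem.List.slice l none (some i) ++ [PySem.List.pyGetD r i 0]
            ++ PySem.List.slice l (some (i + 1)) none
        if fixed = (PySem.List.slice? fixed none none (-1)).getD [] then "yes" else "no"
    | none => "no"   -- unreachable: l ≠ r guarantees a mismatch (Python's next would raise)

-- ===== PRECONDITION & SPEC =====
def Spec_canWe (l : List Int) (out : String) : Prop := out = canWe_alt l
instance (l : List Int) (out : String) : Decidable (Spec_canWe l out) := by unfold Spec_canWe; infer_instance

-- ===== CLAIM (what is proved, stated in full; the proofs are below) =====
def Claim_equal_canWe : Prop := ∀ (l : List Int), Dom_canWe l → Spec_canWe l (canWe l)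

-- ===== LEMMAS AND PROOFS =====

-- the palindrome-pair mismatch predicate, Nat-indexed
def pvQ (l : List Int) (j : Nat) : Bool := decide (l.getD j 0 ≠ l.getD (l.length - (j + 1)) 0)

lemma pvLoop_eq (l : List Int) (idxs : List Nat) (count : Int)
    (hall : ∀ j ∈ idxs, j < l.length) (hc0 : count ≤ 1) :
    canWeLoop l (idxs.map (fun k : Nat => (k : Int))) count =
      if count + (idxs.countP (pvQ l) : Int) ≤ 1 then "yes" else "no" := by
  induction idxs generalizing count with
  | nil => simp [canWeLoop]; omega
  | cons j rest ih =>
    have hj : j < l.length := hall j (by simp)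
    have h1 : PySem.List.pyGetD l (j : Int) 0 = l.getD j 0 := by simp
    have h2 : PySem.List.pyGetD l (-(j : Int) - 1) 0 = l.getD (l.length - (j + 1)) 0 := by
      rw [show (-(j : Int) - 1) = -(((j + 1 : Nat)) : Int) by push_cast; ring,
        PySem.List.pyGetD_neg_natCast l (j + 1) 0 (by omega) (by omega)]
      exact (List.getD_eq_getElem l 0 (by omega)).symm
    rw [List.map_cons]
    show (let c := if PySem.List.pyGetD l (j : Int) 0 ≠ PySem.List.pyGetD l (-(j:Int) - 1) 0
            then count + 1 else count
          if c > 1 then "no" else canWeLoop l (rest.map (fun k : Nat => (k : Int))) c) = _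
    simp only [h1, h2, List.countP_cons, pvQ]
    by_cases hq : l.getD j 0 ≠ l.getD (l.length - (j + 1)) 0
    · rw [if_pos hq]
      simp only [decide_eq_true_eq]
      rw [if_pos hq]
      by_cases hc : count + 1 > 1
      · rw [if_pos hc, if_neg (by push_cast; omega)]
      · rw [if_neg hc, ih _ (fun x hx => hall x (by simp [hx])) (by omega)]
        have he : count + 1 + ((rest.countP (pvQ l) : Nat) : Int)
            = count + (((rest.countP (pvQ l) : Nat) + 1 : Nat) : Int) := by push_cast; ring
        rw [he]
    · rw [if_neg hq]
      simp only [decide_eq_true_eq]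
      rw [if_neg hq]
      rw [if_neg (by omega), ih _ (fun x hx => hall x (by simp [hx])) hc0]
      simp

lemma pvA_eq (l : List Int) :
    canWe l = if ((List.range (l.length / 2)).countP (pvQ l) : Int) ≤ 1 then "yes" else "no" := by
  show canWeLoop l (PySem.List.pyRange 0 (PySem.Int.floordiv (l.length : Int) 2) 1) 0 = _
  have hf : PySem.Int.floordiv (l.length : Int) 2 = ((l.length / 2 : Nat) : Int) := by
    exact_mod_cast PySem.Int.floordiv_natCast l.length 2
  rw [hf, PySem.List.pyRange_one]
  rw [show ((((l.length / 2 : Nat) : Int)) - 0).toNat = l.length / 2 by omega]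
  have hm : (List.range (l.length / 2)).map (fun k : Nat => (0 : Int) + k)
      = (List.range (l.length / 2)).map (fun k : Nat => (k : Int)) := by simp
  rw [hm, pvLoop_eq l _ 0 (fun j hj => by simp at hj; omega) (by omega)]
  simp

lemma pvQ_reflect (l : List Int) (j : Nat) (hj : j < l.length) :
    pvQ l (l.length - (j + 1)) = pvQ l j := by
  unfold pvQ
  rw [show l.length - (l.length - (j + 1) + 1) = j from by omega]
  simp [ne_comm]

lemma pvRev_getD (l : List Int) (k : Nat) (hk : k < l.length) :
    l.reverse.getD k 0 = l.getD (l.length - (k + 1)) 0 := by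
  rw [List.getD_eq_getElem l.reverse 0 (by simpa using hk),
      List.getD_eq_getElem l 0 (by omega), List.getElem_reverse]
  congr 1
  omega

lemma pvPal_iff (l : List Int) :
    l = l.reverse ↔ ∀ j, j < l.length → pvQ l j = false := by
  constructor
  · intro h j hj
    unfold pvQ
    simp only [decide_eq_false_iff_not, not_not]
    have := pvRev_getD l j hj
    rw [← this]
    conv_lhs => rw [h]
  · intro h
    apply List.ext_getElem (by simp)
    intro i h1 h2
    have hq := h i h1
    unfold pvQ at hq
    simp only [decide_eq_false_iff_not, not_not] at hq
    rw [List.getD_eq_getElem l 0 h1, List.getD_eq_getElem l 0 (by omega : l.length - (i+1) < l.length)] at hq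
    rw [hq, List.getElem_reverse]
    congr 1
    omega

-- two distinct satisfying elements force count ≥ 2
lemma pvTwo_le_countP (L : List Nat) (p : Nat → Bool) (a b : Nat) (hab : a ≠ b)
    (ha : a ∈ L) (hpa : p a) (hb : b ∈ L) (hpb : p b) : 2 ≤ L.countP p := by
  rw [List.countP_eq_length_filter]
  have ha2 : a ∈ L.filter p := List.mem_filter.mpr ⟨ha, hpa⟩
  have hb2 : b ∈ L.filter p := List.mem_filter.mpr ⟨hb, hpb⟩
  match hm : L.filter p with
  | [] => rw [hm] at ha2; simp at ha2
  | [x] =>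
    rw [hm] at ha2 hb2
    simp at ha2 hb2
    exact absurd (ha2.trans hb2.symm) hab
  | x :: y :: t => simp

-- countP over range ≤ 1 when every satisfying index equals i
lemma pvCountP_le_one (h : Nat) (p : Nat → Bool) (i : Nat)
    (huniq : ∀ j, j < h → p j = true → j = i) : (List.range h).countP p ≤ 1 := by
  by_contra hc
  push_neg at hc
  have h2 : 2 ≤ (List.range h).countP p := hc
  -- from count ≥ 2 get two distinct satisfying elements via the filter
  have hf : 2 ≤ ((List.range h).filter p).length := by
    rwa [← List.countP_eq_length_filter]
  match hm : (List.range h).filter p with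
  | [] => rw [hm] at hf; simp at hf
  | [x] => rw [hm] at hf; simp at hf
  | x :: y :: t =>
    have hnd : ((List.range h).filter p).Nodup := (List.nodup_range).filter p
    rw [hm] at hnd
    have hx : x ∈ (List.range h).filter p := by rw [hm]; simp
    have hy : y ∈ (List.range h).filter p := by rw [hm]; simp
    have hxi : x = i := huniq x (by simpa using (List.mem_filter.mp hx).1)
      (List.mem_filter.mp hx).2
    have hyi : y = i := huniq y (by simpa using (List.mem_filter.mp hy).1)
      (List.mem_filter.mp hy).2
    have : x ≠ y := by
      intro hxy
      subst hxy
      simp [List.nodup_cons] at hnd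
    exact this (hxi.trans hyi.symm)

lemma pvB_eq (l : List Int) :
    canWe_alt l = if ((List.range (l.length / 2)).countP (pvQ l) : Int) ≤ 1 then "yes" else "no" := by
  unfold canWe_alt
  rw [PySem.List.slice?_none_none_neg_one]
  simp only [Option.getD_some]
  set n := l.length with hn
  by_cases hpal : l = l.reverse
  · rw [if_pos hpal]
    have hc : (List.range (n / 2)).countP (pvQ l) = 0 := by
      rw [List.countP_eq_zero]
      intro j hj
      simp only [List.mem_range] at hj
      simpa using (pvPal_iff l).mp hpal j (by omega)
    rw [hc]
    norm_num
  · rw [if_neg hpal]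
    -- bridge pyRange/pyGetD to Nat level
    rw [PySem.List.pyRange_one, show (((n : Int)) - 0).toNat = n by omega]
    have hm : (List.range n).map (fun k : Nat => (0 : Int) + k)
        = (List.range n).map (fun k : Nat => (k : Int)) := by simp
    rw [hm, List.find?_map]
    set p : Nat → Bool := ((fun k : Int =>
      PySem.List.pyGetD l k 0 != PySem.List.pyGetD l.reverse k 0) ∘ (fun k : Nat => (k : Int))) with hp
    have hpq : ∀ k, k < n → p k = pvQ l k := by
      intro k hk
      simp only [hp, Function.comp, pvQ]
      rw [show PySem.List.pyGetD l (k : Int) 0 = l.getD k 0 by simp,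
          show PySem.List.pyGetD l.reverse (k : Int) 0 = l.reverse.getD k 0 by simp,
          pvRev_getD l k hk]
      simp only [List.getD]
      rcases eq_or_ne (l[k]?.getD 0) (l[l.length - (k + 1)]?.getD 0) with hxy | hxy <;>
        simp [hxy]
    -- a mismatch exists, so find? succeeds
    obtain ⟨j0, hj0n, hj0⟩ : ∃ j, j < n ∧ pvQ l j = true := by
      by_contra hno
      push_neg at hno
      exact hpal ((pvPal_iff l).mpr (fun j hj => by
        have := hno j hj
        simpa using this))
    have hsome : ((List.range n).find? p).isSome := by
      rw [List.find?_isSome]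
      exact ⟨j0, by simp [List.mem_range]; omega, by rw [hpq j0 hj0n]; exact hj0⟩
    obtain ⟨i, hfind⟩ := Option.isSome_iff_exists.mp hsome
    rw [hfind]
    simp only [Option.map_some]
    -- properties of the found index
    have hin : i < n := by
      have := List.mem_range.mp (List.mem_of_find?_eq_some hfind)
      omega
    have hpi : pvQ l i = true := by
      rw [← hpq i hin]; exact List.find?_some hfind
    have hmin : ∀ j, j < i → pvQ l j = false := by
      intro j hji
      rw [← hpq j (by omega)]
      obtain ⟨-, k, hk, hik, hbefore⟩ := List.find?_eq_some_iff_getElem.mp hfind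
      have hki : k = i := by simpa using hik
      subst hki
      have := hbefore j hji
      simpa using this
    -- i is below the middle
    have hihalf : i < n / 2 := by
      by_contra hge
      push_neg at hge
      have hrefl : pvQ l (n - (i + 1)) = true := by rw [pvQ_reflect l i hin]; exact hpi
      by_cases hmid : n - (i + 1) = i
      · unfold pvQ at hpi
        rw [show n - (i + 1) = i from hmid] at hpi
        simp at hpi
      · have hlt : n - (i + 1) < i := by omega
        rw [hmin _ hlt] at hrefl
        simp at hrefl
    -- the repaired list is l.set i (l.getD (n-(i+1)) 0)
    have hri : PySem.List.pyGetD l.reverse (i : Int) 0 = l.getD (n - (i + 1)) 0 := by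
      rw [show PySem.List.pyGetD l.reverse (i : Int) 0 = l.reverse.getD i 0 by simp,
          pvRev_getD l i hin]
    have hsl1 : PySem.List.slice l none (some (i : Int)) = l.take i :=
      PySem.List.slice_to_natCast l i
    have hsl2 : PySem.List.slice l (some ((i : Int) + 1)) none = l.drop (i + 1) := by
      rw [show ((i : Int) + 1) = (((i + 1 : Nat)) : Int) by push_cast; ring]
      exact PySem.List.slice_from_natCast l (i + 1)
    simp only [hsl1, hsl2, hri, PySem.List.slice?_none_none_neg_one, Option.getD_some]
    set v : Int := l.getD (n - (i + 1)) 0 with hv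
    have hfix : l.take i ++ [v] ++ l.drop (i + 1) = l.set i v := by
      rw [List.set_eq_take_append_cons_drop, if_pos (show i < l.length by omega)]
      simp
    simp only [hfix]
    set f : List Int := l.set i v with hf
    have hflen : f.length = n := by simp [hf, hn]
    have hfget : ∀ j, j < n → f.getD j 0 = if j = i then v else l.getD j 0 := by
      intro j hj
      have hjl : j < l.length := by rw [← hn]; exact hj
      have hjf : j < f.length := by omega
      rw [List.getD_eq_getElem f 0 hjf]
      simp only [hf, List.getElem_set]
      by_cases hji : j = i
      · simp [hji]
      · rw [if_neg (fun h => hji h.symm), if_neg hji, List.getD_eq_getElem l 0 hjl]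
    -- mismatch pairs of f are exactly those of l outside {i, n-1-i}
    have hQf : ∀ j, j < n → pvQ f j = (pvQ l j && !(decide (j = i)) && !(decide (j = n - (i + 1)))) := by
      intro j hj
      unfold pvQ
      rw [hflen, hfget j hj, hfget (n - (j + 1)) (by omega)]
      by_cases hji : j = i
      · subst hji
        rw [if_pos rfl]
        by_cases hmir : n - (j + 1) = j
        · rw [if_pos hmir]
          have : v = l.getD (n - (j + 1)) 0 := hv
          simp [this, hmir]
        · rw [if_neg hmir, ← hv]
          simp
      · rw [if_neg hji]
        by_cases hjm : j = n - (i + 1)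
        · have hij : n - (j + 1) = i := by omega
          rw [if_pos hij, hjm, ← hv]
          simp
        · have hij : n - (j + 1) ≠ i := by omega
          rw [if_neg hij]
          simp [hji, hjm, ← hn]
    by_cases hone : ∀ j, j < n / 2 → pvQ l j = true → j = i
    · -- exactly one bad pair: f is a palindrome, both sides yes
      have hcle : (List.range (n / 2)).countP (pvQ l) ≤ 1 := pvCountP_le_one _ _ i hone
      have hfpal : f = f.reverse := by
        rw [pvPal_iff]
        intro j hj
        rw [hflen] at hj
        rw [hQf j hj]
        by_cases hji : j = i
        · simp [hji]
        · by_cases hjm : j = n - (i + 1)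
          · simp [hjm]
          · have hql : pvQ l j = false := by
              by_cases hjh : j < n / 2
              · by_contra hq
                rw [Bool.not_eq_false] at hq
                exact hji (hone j hjh hq)
              · have hj' : n - (j + 1) < n / 2 ∨ n - (j + 1) = j := by omega
                rcases hj' with hlt | heq
                · rw [← pvQ_reflect l j hj]
                  by_contra hq
                  rw [Bool.not_eq_false] at hq
                  have := hone _ hlt hq
                  omega
                · unfold pvQ
                  rw [show n - (j + 1) = j from heq]
                  simp
            simp [hql]
      rw [if_pos hfpal, if_pos (by exact_mod_cast hcle)]
    · -- two distinct bad pairs: f is not a palindrome, both sides no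
      push_neg at hone
      obtain ⟨j, hjh, hqj, hji⟩ := hone
      have hc2 : 2 ≤ (List.range (n / 2)).countP (pvQ l) :=
        pvTwo_le_countP _ _ i j (fun h => hji h.symm)
          (List.mem_range.mpr hihalf) hpi (List.mem_range.mpr hjh) hqj
      have hfnpal : ¬ (f = f.reverse) := by
        rw [pvPal_iff]
        push_neg
        refine ⟨j, by omega, ?_⟩
        rw [hQf j (by omega)]
        have hjm : j ≠ n - (i + 1) := by omega
        simp [hqj, hji, hjm]
      rw [if_neg hfnpal, if_neg (by push_cast; omega)]

-- ===== VERDICT (by name: the statement is the Claim_ definition above) =====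
theorem canWe_spec : Claim_equal_canWe := by
  intro l _
  unfold Spec_canWe
  rw [pvA_eq, pvB_eq]
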